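-- pv_equiv track=rewrite | github.com/qws941/youtube | src/services/video/subtitles.py | _chunk_long_sentence
-- ===== SOURCE A (Python) =====
-- def _chunk_long_sentence(words: list[str]) -> list[str]:
--     chunks = []
--     current_chunk: list[str] = []
--     word_count = 0
--
--     for word in words:
--         current_chunk.append(word)
--         word_count += 1
--
--         if word_count >= 10 and (word.endswith(",") or word_count >= 12):
--             chunks.append(" ".join(current_chunk))
--             current_chunk = []
--             word_count = 0
--
--     if current_chunk:
--         chunks.append(" ".join(current_chunk))
--
--     return chunks
-- ===== SOURCE B (Python) =====
-- def _chunk_long_sentence(words: list[str]) -> list[str]: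
--     n = len(words)
--
--     def first_cut(start):
--         cnt = 0
--         for i in range(start, n):
--             cnt += 1
--             if cnt >= 10 and (words[i].endswith(",") or cnt >= 12):
--                 return i + 1
--         return None
--
--     chunks = []
--     start = 0
--     while True:
--         k = first_cut(start)
--         if k is None:
--             break
--         chunks.append(" ".join(words[start:k]))
--         start = k
--     if start < n:
--         chunks.append(" ".join(words[start:]))
--     return chunks
-- ===== Notes on version B (the rewrite author's own statement) =====
-- stated objective: alternative
-- what changed: Instead of A's single pass that grows a running current_chunk word list and resets a counter, B repeatedly locates the next cut index on the remaining words and emits each chunk by slicing and joining, never maintaining an incremental chunk buffer.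
import Mathlib
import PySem

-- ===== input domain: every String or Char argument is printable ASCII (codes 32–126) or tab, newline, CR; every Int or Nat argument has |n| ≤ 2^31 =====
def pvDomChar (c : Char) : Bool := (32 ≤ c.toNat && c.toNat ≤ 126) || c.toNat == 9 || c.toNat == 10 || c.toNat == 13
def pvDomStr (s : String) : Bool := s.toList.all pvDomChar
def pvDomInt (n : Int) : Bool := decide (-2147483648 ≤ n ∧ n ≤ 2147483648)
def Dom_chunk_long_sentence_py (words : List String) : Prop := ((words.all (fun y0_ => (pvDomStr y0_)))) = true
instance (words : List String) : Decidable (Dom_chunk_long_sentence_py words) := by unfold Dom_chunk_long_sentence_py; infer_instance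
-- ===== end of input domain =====

-- B replaces A's incremental current_chunk buffer by locating each next cut index and slicing the chunk out; alternative decomposition, same cost.

-- ===== PORT A =====
-- one loop step of A: append word to current_chunk, bump the counter, cut if due
def pvStepA (s : List String × List String × Nat) (w : String) : List String × List String × Nat :=
  let cur := s.2.1 ++ [w]
  let cnt := s.2.2 + 1
  if 10 ≤ cnt ∧ (PySem.Str.endswith w "," = true ∨ 12 ≤ cnt) then
    (s.1 ++ [PySem.Str.join " " cur], [], 0)
  else
    (s.1, cur, cnt)

def chunk_long_sentence_py (words : List String) : List String :=
  let s := words.foldl pvStepA ([], [], 0)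
  if s.2.1 ≠ [] then s.1 ++ [PySem.Str.join " " s.2.1] else s.1

-- ===== PORT B =====
-- first_cut of Source B: scan indices from start; return the index just past the first cut word, none if no cut
def pvFirstCutB (words : List String) (i : Nat) (cnt : Nat) : Option Nat :=
  if h : i < words.length then
    if 10 ≤ cnt + 1 ∧ (PySem.Str.endswith words[i] "," = true ∨ 12 ≤ cnt + 1) then some (i + 1)
    else pvFirstCutB words (i + 1) (cnt + 1)
  else none
termination_by words.length - i

-- needed by pvChunksB's termination proof
theorem pvFirstCutB_bounds : ∀ (words : List String) (i cnt k : Nat),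
    pvFirstCutB words i cnt = some k → i < k ∧ k ≤ words.length := by
  intro words i cnt
  induction i, cnt using pvFirstCutB.induct (words := words) with
  | case1 i cnt h hc =>
    intro k hk
    rw [pvFirstCutB] at hk
    simp only [dif_pos h, if_pos hc, Option.some.injEq] at hk
    omega
  | case2 i cnt h hc ih =>
    intro k hk
    rw [pvFirstCutB] at hk
    simp only [dif_pos h, if_neg hc] at hk
    have := ih k hk
    omega
  | case3 i cnt h =>
    intro k hk
    rw [pvFirstCutB] at hk
    simp only [dif_neg h] at hk
    simp at hk

-- the while loop of Source B: emit the slice up to each cut, then the remainder words[start:]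
def pvChunksB (words : List String) (start : Nat) : List String :=
  match h : pvFirstCutB words start 0 with
  | some k =>
      PySem.Str.join " " (PySem.List.slice words (some (start : Int)) (some (k : Int))) ::
        pvChunksB words k
  | none =>
      if start < words.length then
        [PySem.Str.join " " (PySem.List.slice words (some (start : Int)) none)]
      else []
termination_by words.length - start
decreasing_by
  have := pvFirstCutB_bounds words start 0 k h
  omega

def chunk_long_sentence_py_alt (words : List String) : List String :=
  pvChunksB words 0

-- ===== PRECONDITION & SPEC =====
def Spec_chunk_long_sentence_py (words : List String) (out : List String) : Prop := out = chunk_long_sentence_py_alt words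
instance (words : List String) (out : List String) : Decidable (Spec_chunk_long_sentence_py words out) := by unfold Spec_chunk_long_sentence_py; infer_instance

-- ===== CLAIM (what is proved, stated in full; the proofs are below) =====
def Claim_equal_chunk_long_sentence_py : Prop := ∀ (words : List String), Dom_chunk_long_sentence_py words → Spec_chunk_long_sentence_py words (chunk_long_sentence_py words)

-- ===== LEMMAS AND PROOFS =====

-- proof-only helper: the first cut of a (suffix) list, counted relatively (cnt accumulates)
def pvFirstCut : List String → Nat → Option Nat
  | [], _ => none
  | w :: ws, cnt =>
    let c := cnt + 1
    if 10 ≤ c ∧ (PySem.Str.endswith w "," = true ∨ 12 ≤ c) then some c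
    else pvFirstCut ws c

theorem pvFirstCut_bounds : ∀ (ws : List String) (cnt k : Nat),
    pvFirstCut ws cnt = some k → cnt < k ∧ k ≤ cnt + ws.length := by
  intro ws
  induction ws with
  | nil => intro cnt k h; simp [pvFirstCut] at h
  | cons w ws ih =>
    intro cnt k h
    simp only [pvFirstCut] at h
    split at h
    · cases h; constructor <;> simp
    · have := ih (cnt + 1) k h
      simp only [List.length_cons]
      omega

-- B's absolute-index scan agrees with the relative scan over the suffix
theorem pvFC_bridge : ∀ (words : List String) (i cnt : Nat),
    pvFirstCutB words i cnt = (pvFirstCut (words.drop i) cnt).map (fun c => i + (c - cnt)) := by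
  intro words i cnt
  induction i, cnt using pvFirstCutB.induct (words := words) with
  | case1 i cnt h hc =>
    rw [pvFirstCutB, List.drop_eq_getElem_cons h]
    simp only [dif_pos h, if_pos hc, pvFirstCut, Option.map_some, Option.some.injEq]
    omega
  | case2 i cnt h hc ih =>
    rw [pvFirstCutB, List.drop_eq_getElem_cons h]
    simp only [dif_pos h, if_neg hc, pvFirstCut]
    rw [ih]
    cases hFC : pvFirstCut (words.drop (i + 1)) (cnt + 1) with
    | none => simp
    | some c =>
      have := pvFirstCut_bounds _ _ _ hFC
      simp only [Option.map_some, Option.some.injEq]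
      omega
  | case3 i cnt h =>
    rw [pvFirstCutB, List.drop_eq_nil_of_le (by omega)]
    simp [dif_neg h, pvFirstCut]

-- A's fold only appends to the chunks component: the accumulated chunks factor out
theorem pv_foldlA_prefix : ∀ (ws : List String) (chunks cur : List String) (cnt : Nat),
    List.foldl pvStepA (chunks, cur, cnt) ws =
      (chunks ++ (List.foldl pvStepA ([], cur, cnt) ws).1,
       (List.foldl pvStepA ([], cur, cnt) ws).2) := by
  intro ws
  induction ws with
  | nil => intro chunks cur cnt; simp
  | cons w ws ih =>
    intro chunks cur cnt
    simp only [List.foldl_cons, pvStepA]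
    split
    · simp only [List.nil_append]
      rw [ih (chunks ++ [PySem.Str.join " " (cur ++ [w])]) [] 0,
          ih [PySem.Str.join " " (cur ++ [w])] [] 0]
      simp
    · exact ih chunks (cur ++ [w]) (cnt + 1)

-- if no cut is found, A's fold just accumulates every word into current_chunk
theorem pv_foldlA_none : ∀ (ws : List String) (cur : List String) (cnt : Nat) (chunks : List String),
    pvFirstCut ws cnt = none →
    List.foldl pvStepA (chunks, cur, cnt) ws = (chunks, cur ++ ws, cnt + ws.length) := by
  intro ws
  induction ws with
  | nil => intro cur cnt chunks _; simp
  | cons w ws ih =>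
    intro cur cnt chunks h
    simp only [pvFirstCut] at h
    split at h
    · exact absurd h (by simp)
    · rename_i hc
      simp only [List.foldl_cons, pvStepA]
      rw [if_neg hc, ih (cur ++ [w]) (cnt + 1) chunks h]
      have hn : cnt + 1 + ws.length = cnt + (w :: ws).length := by
        simp only [List.length_cons]; omega
      rw [hn]
      simp

-- if a cut is found at count k, A's fold emits one chunk and restarts cleanly
theorem pv_foldlA_cut : ∀ (ws : List String) (cur : List String) (cnt : Nat) (chunks : List String) (k : Nat),
    pvFirstCut ws cnt = some k →
    List.foldl pvStepA (chunks, cur, cnt) ws =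
      List.foldl pvStepA
        (chunks ++ [PySem.Str.join " " (cur ++ ws.take (k - cnt))], [], 0)
        (ws.drop (k - cnt)) := by
  intro ws
  induction ws with
  | nil => intro cur cnt chunks k h; simp [pvFirstCut] at h
  | cons w ws ih =>
    intro cur cnt chunks k h
    simp only [pvFirstCut] at h
    split at h
    · rename_i hc
      cases h
      have hk : cnt + 1 - cnt = 1 := by omega
      simp only [List.foldl_cons, pvStepA, if_pos hc, hk, List.take_succ_cons,
        List.take_zero, List.drop_succ_cons, List.drop_zero]
    · rename_i hc
      have hb := pvFirstCut_bounds ws (cnt + 1) k h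
      have hk : k - cnt = (k - (cnt + 1)) + 1 := by omega
      simp only [List.foldl_cons, pvStepA, if_neg hc]
      rw [ih (cur ++ [w]) (cnt + 1) chunks k h, hk]
      simp [List.take_succ_cons, List.drop_succ_cons]

-- A's value when the word list has a first cut after c words
theorem pvA_cut (ws : List String) (c : Nat) (h : pvFirstCut ws 0 = some c) :
    chunk_long_sentence_py ws =
      PySem.Str.join " " (ws.take c) :: chunk_long_sentence_py (ws.drop c) := by
  unfold chunk_long_sentence_py
  rw [pv_foldlA_cut ws [] 0 [] c h]
  simp only [Nat.sub_zero, List.nil_append]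
  rw [pv_foldlA_prefix]
  by_cases hE : (List.foldl pvStepA ([], [], 0) (ws.drop c)).2.1 = [] <;> simp [hE]

-- A's value when the word list has no cut
theorem pvA_none (ws : List String) (h : pvFirstCut ws 0 = none) :
    chunk_long_sentence_py ws = if ws = [] then [] else [PySem.Str.join " " ws] := by
  unfold chunk_long_sentence_py
  rw [pv_foldlA_none ws [] 0 [] h]
  by_cases hw : ws = [] <;> simp [hw]

theorem pv_chunk_suffix : ∀ (words : List String) (start : Nat),
    pvChunksB words start = chunk_long_sentence_py (words.drop start) := by
  intro words start
  induction start using pvChunksB.induct (words := words) with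
  | case1 start k h ih =>
    rw [pvChunksB]
    split
    · rename_i k' h'
      rw [h] at h'
      cases h'
      rw [pvFC_bridge] at h
      cases hFC : pvFirstCut (words.drop start) 0 with
      | none => rw [hFC] at h; simp at h
      | some c =>
        rw [hFC] at h
        simp only [Option.map_some, Option.some.injEq] at h
        rw [pvA_cut (words.drop start) c hFC, ih, PySem.List.slice_natCast,
            List.drop_drop]
        have h1 : k - start = c := by omega
        have h2 : start + c = k := by omega
        rw [h1, h2]
    · rename_i h'
      rw [h] at h'
      cases h'
  | case2 start h hlt =>
    rw [pvChunksB]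
    split
    · rename_i k' h'
      rw [h] at h'
      cases h'
    · rw [pvFC_bridge] at h
      have hFC : pvFirstCut (words.drop start) 0 = none := by
        cases hx : pvFirstCut (words.drop start) 0 with
        | none => rfl
        | some c => rw [hx] at h; simp at h
      rw [pvA_none (words.drop start) hFC, PySem.List.slice_from_natCast,
          if_pos hlt, if_neg (by rw [List.drop_eq_nil_iff]; omega)]
  | case3 start h hge =>
    rw [pvChunksB]
    split
    · rename_i k' h'
      rw [h] at h'
      cases h'
    · rw [pvFC_bridge] at h
      have hFC : pvFirstCut (words.drop start) 0 = none := by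
        cases hx : pvFirstCut (words.drop start) 0 with
        | none => rfl
        | some c => rw [hx] at h; simp at h
      rw [pvA_none (words.drop start) hFC, if_neg hge,
          if_pos (List.drop_eq_nil_of_le (by omega))]

theorem pv_chunk_eq (words : List String) :
    chunk_long_sentence_py words = chunk_long_sentence_py_alt words := by
  unfold chunk_long_sentence_py_alt
  rw [pv_chunk_suffix words 0, List.drop_zero]

-- ===== VERDICT (by name: the statement is the Claim_ definition above) =====
theorem chunk_long_sentence_py_spec : Claim_equal_chunk_long_sentence_py := by
  intro words _
  unfold Spec_chunk_long_sentence_py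
  exact pv_chunk_eq words
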